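-- pv_equiv track=rewrite | github.com/minSW/leetcode | etc/codejam2021/reversesort_engineering.py | reversesort_list
-- ===== SOURCE A (Python) =====
-- def get_cost_list(N, C) :
--     costs = [ 1 for x in range(N-1) ]
--     rest = C - N + 1
--     for i in range(N-1, 0, -1) :
--         if rest == 0 :
--             break
--         elif rest >= i :
--             costs[i-1] += i
--             rest -= i
--         else :
--             costs[i-1] += rest
--             break
--     return costs
--
-- def reversesort_list(N, C) :
--     if C < N - 1 or C > N * (N + 1) / 2 - 1 :
--         return list()
--
--     costs = get_cost_list(N, C)
--     L = [ x for x in range(1, N+1) ]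
--     for c in costs :
--         i = N - c
--         L[i:] = reversed(L[i:])
--
--     return L
--
--     for i in range(len(L)-1) :
--         j = L.index(min(L[i:]))
--         L[i:j+1] = reversed(L[i:j+1])
--         count += j - i + 1
--     return count
-- ===== SOURCE B (Python) =====
-- def reversesort_list(N, C):
--     # guard: same bounds as the spec; N*(N+1) is always even, so the integer
--     # comparison 2*C > N*(N+1) - 2 is exact (no float division needed)
--     if C < N - 1 or 2 * C > N * (N + 1) - 2:
--         return []
--
--     # Greedily split the extra cost rest = C-(N-1) over the largest cost slots,
--     # keeping only the NON-TRIVIAL suffix-reversal lengths (cost 1 reversals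
--     # reverse a single element and do nothing).  lengths is collected in
--     # DESCENDING order = reverse of the order in which A applies them.
--     lengths = []
--     rest = C - (N - 1)
--     i = N - 1
--     while i > 0 and rest > 0:
--         take = i if rest >= i else rest
--         lengths.append(take + 1)
--         rest -= take
--         i -= 1
--
--     if not lengths:
--         return list(range(1, N + 1))
--
--     # The reversals are nested suffix reversals of strictly increasing length
--     # (applied smallest first).  Peeling them from the OUTERMOST in, the final
--     # window of length lm is a sequence of consecutive-value blocks placed
--     # alternately at the right end (reversed) and the left end (forward).
--     # Build the left part and the right part (the latter stored mirrored) in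
--     # one O(N) pass instead of actually reversing suffixes.
--     lm = lengths[0]
--     left = []
--     right = []  # stored in reverse of its final order
--     v = N - lm + 1
--     from_right = True
--     for k in range(len(lengths)):
--         inner = lengths[k + 1] if k + 1 < len(lengths) else 0
--         blk = lengths[k] - inner
--         if from_right:
--             right.extend(range(v, v + blk))
--         else:
--             left.extend(range(v, v + blk))
--         v += blk
--         from_right = not from_right
--
--     right.reverse()
--     return list(range(1, N - lm + 1)) + left + right
-- ===== Notes on version B (the rewrite author's own statement) =====
-- stated objective: alternative
-- what changed: Instead of materialising an (N-1)-entry cost array and executing every suffix reversal in sequence, B collects only the non-trivial nested reversal lengths and writes the final permutation directly in one O(N) pass, placing consecutive-value blocks alternately at the right end (reversed) and the left end of the affected window; A moves O(C) elements in total, B O(N).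
import Mathlib
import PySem

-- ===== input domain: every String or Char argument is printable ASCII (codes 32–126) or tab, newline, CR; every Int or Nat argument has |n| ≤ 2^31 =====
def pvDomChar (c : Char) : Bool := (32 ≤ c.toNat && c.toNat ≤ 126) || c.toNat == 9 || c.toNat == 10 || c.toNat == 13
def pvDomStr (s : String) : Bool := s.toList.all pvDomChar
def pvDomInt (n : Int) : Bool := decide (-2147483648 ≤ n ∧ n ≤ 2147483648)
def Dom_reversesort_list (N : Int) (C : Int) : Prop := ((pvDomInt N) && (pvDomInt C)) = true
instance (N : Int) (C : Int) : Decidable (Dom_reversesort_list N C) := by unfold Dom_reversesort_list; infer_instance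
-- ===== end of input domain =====

-- B replaces A's "build an (N-1)-entry cost array and execute every suffix reversal"
-- by "collect only the non-trivial nested reversal lengths and write the final
-- permutation directly, block by block" (objective: alternative one-pass construction).

-- ===== PORT A =====
-- for i in range(N-1, 0, -1): break / costs[i-1] += i / costs[i-1] += rest; break
def gclLoop (costs : List Int) (rest : Int) : List Int → List Int
  | [] => costs
  | i :: is =>
    if rest = 0 then costs
    else if rest ≥ i then
      gclLoop (PySem.List.pySetD costs (i-1) (PySem.List.pyGetD costs (i-1) 0 + i)) (rest - i) is
    else PySem.List.pySetD costs (i-1) (PySem.List.pyGetD costs (i-1) 0 + rest)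

def get_cost_list (N : Int) (C : Int) : List Int :=
  let costs := (PySem.List.pyRange 0 (N-1) 1).map (fun _ => (1:Int))
  let rest := C - N + 1
  gclLoop costs rest (PySem.List.pyRange (N-1) 0 (-1))

-- loop body: i = N - c; L[i:] = reversed(L[i:])
def revStep (N : Int) (L : List Int) (c : Int) : List Int :=
  PySem.List.slice L none (some (N - c)) ++ (PySem.List.slice L (some (N - c)) none).reverse

def reversesort_list (N : Int) (C : Int) : List Int :=
  -- Python compares C > N*(N+1)/2 - 1 with float division; on |N|,|C| ≤ 2^31 the
  -- float comparison coincides with this exact rational comparison (N*(N+1) is even,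
  -- and at magnitudes where the float rounds, the two sides are astronomically apart).
  if C < N - 1 ∨ ((C:ℚ) > ((N:ℚ) * ((N:ℚ) + 1)) / 2 - 1) then []
  else
    let costs := get_cost_list N C
    let L := PySem.List.pyRange 1 (N+1) 1
    costs.foldl (revStep N) L

-- ===== PORT B =====
-- while i > 0 and rest > 0: take = i if rest >= i else rest; lengths.append(take+1); …
def altLenLoop (i : Int) (rest : Int) (acc : List Int) : List Int :=
  if h : 0 < i ∧ 0 < rest then
    let take := if rest ≥ i then i else rest
    altLenLoop (i - 1) (rest - take) (acc ++ [take + 1])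
  else acc
termination_by i.toNat
decreasing_by omega

-- the fill loop: blocks of consecutive values go alternately to the right part
-- (stored mirrored) and to the left part
def altFill (v : Int) (left right : List Int) (fromRight : Bool) : List Int → List Int × List Int
  | [] => (left, right)
  | cur :: rest =>
    let inner := match rest with | [] => (0:Int) | x :: _ => x
    let blk := cur - inner
    let block := PySem.List.pyRange v (v + blk) 1
    if fromRight then altFill (v + blk) left (right ++ block) false rest
    else altFill (v + blk) (left ++ block) right true rest

def reversesort_list_alt (N : Int) (C : Int) : List Int :=
  if C < N - 1 ∨ 2 * C > N * (N + 1) - 2 then []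
  else
    let lengths := altLenLoop (N - 1) (C - (N - 1)) []
    match lengths with
    | [] => PySem.List.pyRange 1 (N+1) 1
    | lm :: _ =>
      let lr := altFill (N - lm + 1) [] [] true lengths
      PySem.List.pyRange 1 (N - lm + 1) 1 ++ lr.1 ++ lr.2.reverse

-- ===== PRECONDITION & SPEC =====
def Spec_reversesort_list (N : Int) (C : Int) (out : List Int) : Prop := out = reversesort_list_alt N C
instance (N : Int) (C : Int) (out : List Int) : Decidable (Spec_reversesort_list N C out) := by unfold Spec_reversesort_list; infer_instance

-- ===== CLAIM (what is proved, stated in full; the proofs are below) =====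
def Claim_equal_reversesort_list : Prop := ∀ (N : Int) (C : Int), Dom_reversesort_list N C → Spec_reversesort_list N C (reversesort_list N C)

-- ===== LEMMAS AND PROOFS =====

-- the common greedy specification: descending list of non-trivial reversal lengths
def greedy (i : Int) (rest : Int) : List Int :=
  if h : 0 < i ∧ 0 < rest then (min rest i + 1) :: greedy (i - 1) (rest - min rest i) else []
termination_by i.toNat
decreasing_by omega

theorem altLenLoop_eq_greedy (i rest : Int) (acc : List Int) :
    altLenLoop i rest acc = acc ++ greedy i rest := by
  induction i, rest, acc using altLenLoop.induct with
  | case1 j rest2 acc2 h tk ihx =>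
    rw [altLenLoop, greedy, dif_pos h, dif_pos h]
    have ht : tk = min rest2 j := by
      simp only [tk]
      split <;> omega
    rw [ht] at ihx
    have ht2 : (if rest2 ≥ j then j else rest2) = min rest2 j := by split <;> omega
    simp only [ht2]
    rw [ihx]
    simp
  | case2 j rest2 acc2 h =>
    rw [altLenLoop, greedy, dif_neg h, dif_neg h]
    simp

-- the guard conditions agree
theorem guard_iff (N C : Int) :
    (C < N - 1 ∨ ((C:ℚ) > ((N:ℚ) * ((N:ℚ) + 1)) / 2 - 1)) ↔ (C < N - 1 ∨ 2 * C > N * (N + 1) - 2) := by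
  have h2 : ((C:ℚ) > ((N:ℚ) * ((N:ℚ) + 1)) / 2 - 1) ↔ (2 * C > N * (N + 1) - 2) := by
    constructor <;> intro h
    · have hq : ((N:ℚ) * ((N:ℚ) + 1)) - 2 < 2 * (C:ℚ) := by linarith
      have : ((N * (N + 1) - 2 : Int) : ℚ) < ((2 * C : Int) : ℚ) := by push_cast; linarith
      exact_mod_cast this
    · have : ((N * (N + 1) - 2 : Int) : ℚ) < ((2 * C : Int) : ℚ) := by exact_mod_cast h
      push_cast at this
      linarith
  rw [h2]

theorem set_replicate_last (k : Nat) (v : Int) :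
    (List.replicate (k+1) (1:Int)).set k v = List.replicate k 1 ++ [v] := by
  induction k with
  | zero => rfl
  | succ k ih =>
    rw [List.replicate_succ, List.set_cons_succ, ih, List.replicate_succ]
    simp

theorem set_replicate_pred (k : Nat) (hk : 0 < k) (v : Int) :
    (List.replicate k (1:Int)).set (k-1) v = List.replicate (k-1) 1 ++ [v] := by
  obtain ⟨k', rfl⟩ : ∃ k', k = k' + 1 := ⟨k - 1, by omega⟩
  simpa using set_replicate_last k' v

-- A's greedy loop in terms of greedy
theorem gclLoop_eq_aux : ∀ (n : Nat) (i rest : Int) (done : List Int), i.toNat = n → 0 ≤ rest →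
    gclLoop (List.replicate i.toNat 1 ++ done) rest (PySem.List.pyRange i 0 (-1))
      = List.replicate (i.toNat - (greedy i rest).length) 1 ++ (greedy i rest).reverse ++ done := by
  intro n
  induction n with
  | zero =>
    intro i rest done hn hr
    rw [PySem.List.pyRange_neg_one_eq_nil (by omega : i ≤ 0)]
    rw [greedy, dif_neg (by omega)]
    simp [gclLoop]
  | succ n ih =>
    intro i rest done hn hr
    have hi : 0 < i := by omega
    rw [PySem.List.pyRange_neg_one_cons (by omega : (0:Int) < i)]
    rw [gclLoop]
    by_cases h0 : rest = 0
    · rw [if_pos h0, greedy, dif_neg (by omega)]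
      simp
    · rw [if_neg h0]
      have hrp : 0 < rest := by omega
      have hget : PySem.List.pyGetD (List.replicate i.toNat (1:Int) ++ done) (i-1) 0 = 1 := by
        rw [PySem.List.pyGetD_eq_getElem _ _ (by omega) (by simp; omega)]
        rw [List.getElem_append_left (by simp; omega)]
        simp
      have hset : ∀ v, PySem.List.pySetD (List.replicate i.toNat (1:Int) ++ done) (i-1) v
          = List.replicate (i.toNat - 1) 1 ++ v :: done := by
        intro v
        rw [PySem.List.pySetD_of_nonneg _ _ (by omega)]
        rw [List.set_append, if_pos (by simp; omega)]
        rw [show (i-1).toNat = i.toNat - 1 by omega]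
        rw [set_replicate_pred i.toNat (by omega) v]
        simp
      by_cases hri : rest ≥ i
      · rw [if_pos hri, hget, hset]
        have hg : greedy i rest = (i + 1) :: greedy (i-1) (rest - i) := by
          rw [greedy, dif_pos ⟨hi, hrp⟩, show min rest i = i by omega]
        rw [hg]
        have harg : List.replicate (i.toNat - 1) (1:Int) ++ (1 + i) :: done
            = List.replicate (i-1).toNat 1 ++ ((1 + i) :: done) := by
          rw [show (i-1).toNat = i.toNat - 1 by omega]
        rw [harg, ih (i-1) (rest - i) ((1 + i) :: done) (by omega) (by omega)]
        rw [List.reverse_cons, List.length_cons]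
        rw [show (1 + i) = i + 1 by ring]
        rw [show (i-1).toNat - (greedy (i-1) (rest - i)).length
              = i.toNat - ((greedy (i-1) (rest - i)).length + 1) by omega]
        simp
      · rw [if_neg hri, hget, hset]
        have hg : greedy i rest = [rest + 1] := by
          rw [greedy, dif_pos ⟨hi, hrp⟩, show min rest i = rest by omega]
          rw [show rest - rest = 0 by ring, greedy, dif_neg (by omega)]
        rw [hg]
        rw [show (1 + rest) = rest + 1 by ring]
        simp

theorem gclLoop_eq (i rest : Int) (done : List Int) (hr : 0 ≤ rest) :
    gclLoop (List.replicate i.toNat 1 ++ done) rest (PySem.List.pyRange i 0 (-1))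
      = List.replicate (i.toNat - (greedy i rest).length) 1 ++ (greedy i rest).reverse ++ done :=
  gclLoop_eq_aux i.toNat i rest done rfl hr

theorem greedy_bounds (i rest : Int) : ∀ l ∈ greedy i rest, 2 ≤ l ∧ l ≤ i + 1 := by
  induction i, rest using greedy.induct with
  | case1 i rest h ih =>
    rw [greedy, dif_pos h]
    intro l hl
    rcases List.mem_cons.mp hl with h1 | h1
    · omega
    · have := ih l h1
      omega
  | case2 i rest h =>
    rw [greedy, dif_neg h]
    simp

theorem greedy_sorted (i rest : Int) : (greedy i rest).Pairwise (fun a b => b < a) := by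
  induction i, rest using greedy.induct with
  | case1 i rest h ih =>
    rw [greedy, dif_pos h]
    refine List.Pairwise.cons ?_ ih
    intro b hb
    by_cases hri : rest ≥ i
    · have := greedy_bounds (i-1) (rest - min rest i) b hb
      omega
    · rw [show rest - min rest i = 0 by omega] at hb
      rw [greedy, dif_neg (by omega)] at hb
      simp at hb
  | case2 i rest h =>
    rw [greedy, dif_neg h]
    exact List.Pairwise.nil

-- semantic suffix-reversal step (on Nat index), and its relation to A's revStep
def sstep (L : List Int) (c : Int) : List Int :=
  L.take (L.length - c.toNat) ++ (L.drop (L.length - c.toNat)).reverse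

theorem sstep_length (L : List Int) (c : Int) : (sstep L c).length = L.length := by
  simp [sstep]

theorem revStep_eq_sstep (N : Int) (L : List Int) (c : Int)
    (hL : (L.length : Int) = N) (h1 : 1 ≤ c) (h2 : c ≤ N) : revStep N L c = sstep L c := by
  unfold revStep sstep
  rw [PySem.List.slice_to L (by omega : (0:Int) ≤ N - c), PySem.List.slice_from L (by omega : (0:Int) ≤ N - c)]
  have h : (N - c).toNat = L.length - c.toNat := by omega
  rw [h]

theorem rev_short (xs : List Int) (h : xs.length ≤ 1) : xs.reverse = xs := by
  match xs, h with
  | [], _ => rfl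
  | [a], _ => rfl

theorem revStep_one (N : Int) (L : List Int) (hL : (L.length : Int) = N) (h1 : 1 ≤ N) :
    revStep N L 1 = L := by
  unfold revStep
  rw [PySem.List.slice_to L (by omega : (0:Int) ≤ N - 1), PySem.List.slice_from L (by omega : (0:Int) ≤ N - 1)]
  rw [rev_short _ (by simp; omega)]
  exact List.take_append_drop _ L

theorem foldl_revStep_ones (N : Int) (k : Nat) (L : List Int)
    (hL : (L.length : Int) = N) (h1 : 1 ≤ N) :
    (List.replicate k (1:Int)).foldl (revStep N) L = L := by
  induction k with
  | zero => rfl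
  | succ k ih => rw [List.replicate_succ, List.foldl_cons, revStep_one N L hL h1, ih]

theorem foldl_revStep_eq_sstep (N : Int) (ls : List Int) (L : List Int)
    (hL : (L.length : Int) = N) (hls : ∀ c ∈ ls, 1 ≤ c ∧ c ≤ N) :
    ls.foldl (revStep N) L = ls.foldl sstep L := by
  induction ls generalizing L with
  | nil => rfl
  | cons c ls ih =>
    have hc := hls c (by simp)
    rw [List.foldl_cons, List.foldl_cons, revStep_eq_sstep N L c hL hc.1 hc.2]
    exact ih _ (by rw [sstep_length]; exact hL) (fun c hc => hls c (by simp [hc]))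

def headI0 : List Int → Int | [] => 0 | x :: _ => x

-- the window content produced by the fill loop
def win (v : Int) (ds : List Int) (fr : Bool) : List Int :=
  (altFill v [] [] fr ds).1 ++ (altFill v [] [] fr ds).2.reverse

theorem altFill_acc (ds : List Int) (v : Int) (l r : List Int) (fr : Bool) :
    altFill v l r fr ds = (l ++ (altFill v [] [] fr ds).1, r ++ (altFill v [] [] fr ds).2) := by
  induction ds generalizing v l r fr with
  | nil => simp [altFill]
  | cons cur rest ih =>
    have et : ∀ (v : Int) (L R : List Int), altFill v L R true (cur :: rest)
        = altFill (v + (cur - headI0 rest)) L (R ++ PySem.List.pyRange v (v + (cur - headI0 rest)) 1) false rest := by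
      intro v L R; cases rest <;> rfl
    have ef : ∀ (v : Int) (L R : List Int), altFill v L R false (cur :: rest)
        = altFill (v + (cur - headI0 rest)) (L ++ PySem.List.pyRange v (v + (cur - headI0 rest)) 1) R true rest := by
      intro v L R; cases rest <;> rfl
    cases fr
    · rw [ef, ef,
        ih _ (List.nil ++ PySem.List.pyRange v (v + (cur - headI0 rest)) 1) [] true, ih]
      simp
    · rw [et, et,
        ih _ [] (List.nil ++ PySem.List.pyRange v (v + (cur - headI0 rest)) 1) false, ih]
      simp

theorem win_nil (v : Int) (fr : Bool) : win v [] fr = [] := by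
  simp [win, altFill]

theorem win_cons_true (v cur : Int) (rest : List Int) :
    win v (cur :: rest) true
      = win (v + (cur - headI0 rest)) rest false
          ++ (PySem.List.pyRange v (v + (cur - headI0 rest)) 1).reverse := by
  have et : altFill v [] [] true (cur :: rest)
      = altFill (v + (cur - headI0 rest)) []
          ([] ++ PySem.List.pyRange v (v + (cur - headI0 rest)) 1) false rest := by
    cases rest <;> rfl
  unfold win
  rw [et, altFill_acc rest (v + (cur - headI0 rest)) []
    ([] ++ PySem.List.pyRange v (v + (cur - headI0 rest)) 1) false]
  simp

theorem win_cons_false (v cur : Int) (rest : List Int) :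
    win v (cur :: rest) false
      = PySem.List.pyRange v (v + (cur - headI0 rest)) 1 ++ win (v + (cur - headI0 rest)) rest true := by
  have ef : altFill v [] [] false (cur :: rest)
      = altFill (v + (cur - headI0 rest))
          ([] ++ PySem.List.pyRange v (v + (cur - headI0 rest)) 1) [] true rest := by
    cases rest <;> rfl
  unfold win
  rw [ef, altFill_acc rest (v + (cur - headI0 rest))
    ([] ++ PySem.List.pyRange v (v + (cur - headI0 rest)) 1) [] true]
  simp

theorem win_reverse (ds : List Int) (v : Int) (fr : Bool) :
    (win v ds fr).reverse = win v ds (!fr) := by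
  induction ds generalizing v fr with
  | nil => simp [win_nil]
  | cons cur rest ih =>
    cases fr
    · simp only [Bool.not_false]
      rw [win_cons_false, win_cons_true, List.reverse_append, ih]
      simp
    · simp only [Bool.not_true]
      rw [win_cons_true, win_cons_false, List.reverse_append, List.reverse_reverse, ih]
      simp

theorem win_length (ds : List Int) (v cur : Int) (rest : List Int) (fr : Bool)
    (hds : ds = cur :: rest) (hsort : ds.Pairwise (fun a b => b < a)) (hpos : ∀ l ∈ ds, 1 ≤ l) :
    (win v ds fr).length = cur.toNat := by
  subst hds
  induction rest generalizing cur v fr with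
  | nil =>
    cases fr
    · simp [win_cons_false, win_nil, headI0, PySem.List.length_pyRange_one]
    · simp [win_cons_true, win_nil, headI0, PySem.List.length_pyRange_one]
  | cons inner rs ih =>
    have hlt : inner < cur := (List.pairwise_cons.mp hsort).1 inner (by simp)
    have h1 : 1 ≤ inner := hpos inner (by simp)
    have htail : ∀ l ∈ inner :: rs, 1 ≤ l := fun l hl => hpos l (by simp [hl])
    have hstail := (List.pairwise_cons.mp hsort).2
    cases fr
    · rw [win_cons_false]
      simp only [headI0]
      rw [List.length_append, ih (v + (cur - inner)) inner true hstail htail,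
        PySem.List.length_pyRange_one]
      omega
    · rw [win_cons_true]
      simp only [headI0]
      rw [List.length_append, ih (v + (cur - inner)) inner false hstail htail, List.length_reverse,
        PySem.List.length_pyRange_one]
      omega

theorem foldl_sstep_append (ls : List Int) (a b : List Int)
    (h : ∀ l ∈ ls, 0 ≤ l ∧ l.toNat ≤ b.length) :
    ls.foldl sstep (a ++ b) = a ++ ls.foldl sstep b := by
  induction ls generalizing b with
  | nil => rfl
  | cons l ls ih =>
    have hk : l.toNat ≤ b.length := (h l (by simp)).2
    have hb : sstep (a ++ b) l = a ++ sstep b l := by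
      unfold sstep
      rw [List.length_append]
      rw [show a.length + b.length - l.toNat = a.length + (b.length - l.toNat) from by omega]
      rw [List.take_append, List.drop_append]
      rw [List.take_of_length_le (by omega), List.drop_eq_nil_of_le (by omega)]
      rw [show a.length + (b.length - l.toNat) - a.length = b.length - l.toNat from by omega]
      simp
    rw [List.foldl_cons, List.foldl_cons, hb]
    exact ih (sstep b l) (fun c hc => by rw [sstep_length]; exact h c (by simp [hc]))

theorem main_fill (ds : List Int) (cur : Int) (rest : List Int) (v : Int)
    (hds : ds = cur :: rest) (hsort : ds.Pairwise (fun a b => b < a)) (hpos : ∀ l ∈ ds, 1 ≤ l) :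
    ds.reverse.foldl sstep (PySem.List.pyRange v (v + cur) 1) = win v ds true := by
  subst hds
  induction rest generalizing cur v with
  | nil =>
    rw [List.reverse_singleton, List.foldl_cons, List.foldl_nil]
    rw [win_cons_true, win_nil]
    simp only [headI0]
    unfold sstep
    rw [PySem.List.length_pyRange_one]
    rw [show ((v + cur - v).toNat - cur.toNat) = 0 from by omega]
    simp
  | cons inner rs ih =>
    have hlt : inner < cur := (List.pairwise_cons.mp hsort).1 inner (by simp)
    have h1 : 1 ≤ inner := hpos inner (by simp)
    have htail : ∀ l ∈ inner :: rs, 1 ≤ l := fun l hl => hpos l (by simp [hl])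
    have hstail := (List.pairwise_cons.mp hsort).2
    have hble : ∀ b ∈ inner :: rs, b ≤ inner := by
      intro b hb
      rcases List.mem_cons.mp hb with h' | h'
      · omega
      · have := (List.pairwise_cons.mp hstail).1 b h'
        omega
    rw [List.reverse_cons, List.foldl_append]
    rw [PySem.List.pyRange_one_append v (v + (cur - inner)) (v + cur) (by omega) (by omega)]
    have hw' : PySem.List.pyRange (v + (cur - inner)) (v + cur) 1
        = PySem.List.pyRange (v + (cur - inner)) ((v + (cur - inner)) + inner) 1 := by
      rw [show (v + (cur - inner)) + inner = v + cur from by ring]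
    rw [foldl_sstep_append _ _ _ (by
      intro l hl
      have hm : l ∈ inner :: rs := by
        rw [List.mem_reverse] at hl
        exact hl
      refine ⟨by have := htail l hm; omega, ?_⟩
      rw [PySem.List.length_pyRange_one]
      have := hble l hm
      have := htail l hm
      omega)]
    rw [hw', ih inner (v + (cur - inner)) hstail htail]
    rw [List.foldl_cons, List.foldl_nil]
    have hwl : (win (v + (cur - inner)) (inner :: rs) true).length = inner.toNat :=
      win_length _ _ inner rs true rfl hstail htail
    unfold sstep
    rw [List.length_append, PySem.List.length_pyRange_one, hwl]
    rw [show ((v + (cur - inner) - v).toNat + inner.toNat - cur.toNat) = 0 from by omega]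
    rw [List.take_zero, List.drop_zero, List.reverse_append, win_reverse]
    rw [win_cons_true]
    simp [headI0]

-- ===== VERDICT (by name: the statement is the Claim_ definition above) =====
theorem reversesort_list_spec : Claim_equal_reversesort_list := by
  intro N C _
  unfold Spec_reversesort_list reversesort_list reversesort_list_alt
  by_cases hg : C < N - 1 ∨ 2 * C > N * (N + 1) - 2
  · rw [if_pos ((guard_iff N C).mpr hg), if_pos hg]
  · rw [if_neg (fun h => hg ((guard_iff N C).mp h)), if_neg hg]
    rw [not_or] at hg
    obtain ⟨hg1, hg2⟩ := hg
    have hr0 : 0 ≤ C - N + 1 := by omega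
    have hcost : get_cost_list N C
        = List.replicate ((N-1).toNat - (greedy (N-1) (C - N + 1)).length) 1
            ++ (greedy (N-1) (C - N + 1)).reverse := by
      unfold get_cost_list
      rw [show (PySem.List.pyRange 0 (N-1) 1).map (fun _ => (1:Int))
            = List.replicate (N-1).toNat 1 from by
        rw [List.map_const', PySem.List.length_pyRange_one]
        norm_num]
      rw [show List.replicate (N-1).toNat (1:Int)
            = List.replicate (N-1).toNat 1 ++ [] from by simp]
      rw [gclLoop_eq (N-1) (C - N + 1) [] hr0]
      simp
    have hlens : altLenLoop (N - 1) (C - (N - 1)) [] = greedy (N-1) (C - N + 1) := by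
      rw [altLenLoop_eq_greedy, show C - (N - 1) = C - N + 1 from by ring, List.nil_append]
    rcases hG : greedy (N-1) (C - N + 1) with _ | ⟨lm, g'⟩
    · rw [hcost, hG]
      simp only [List.length_nil, List.reverse_nil, List.append_nil, Nat.sub_zero]
      rw [hlens, hG]
      by_cases hN : 1 ≤ N
      · have hL0len : (((PySem.List.pyRange 1 (N+1) 1).length : Nat) : Int) = N := by
          rw [PySem.List.length_pyRange_one]
          omega
        rw [foldl_revStep_ones N _ _ hL0len hN]
      · rw [show (N-1).toNat = 0 from by omega]
        simp
    · have hb := greedy_bounds (N-1) (C - N + 1)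
      rw [hG] at hb
      have hlm2 : 2 ≤ lm := (hb lm (by simp)).1
      have hlmN : lm ≤ N := by
        have := (hb lm (by simp)).2
        omega
      have hN2 : 2 ≤ N := by omega
      have hsort := greedy_sorted (N-1) (C - N + 1)
      rw [hG] at hsort
      have hpos : ∀ l ∈ lm :: g', 1 ≤ l := fun l hl => by
        have := (hb l hl).1
        omega
      have hble : ∀ l ∈ lm :: g', l ≤ lm := by
        intro l hl
        rcases List.mem_cons.mp hl with h' | h'
        · omega
        · have := (List.pairwise_cons.mp hsort).1 l h'
          omega
      have hL0len : (((PySem.List.pyRange 1 (N+1) 1).length : Nat) : Int) = N := by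
        rw [PySem.List.length_pyRange_one]
        omega
      rw [hcost, hG, List.foldl_append]
      rw [foldl_revStep_ones N _ _ hL0len (by omega)]
      rw [foldl_revStep_eq_sstep N _ _ hL0len (fun c hc => by
        have hc' : c ∈ lm :: g' := List.mem_reverse.mp hc
        have := hb c hc'
        constructor <;> omega)]
      rw [PySem.List.pyRange_one_append 1 (N - lm + 1) (N+1) (by omega) (by omega)]
      rw [foldl_sstep_append _ _ _ (fun l hl => by
        have hl' : l ∈ lm :: g' := List.mem_reverse.mp hl
        refine ⟨by have := hpos l hl'; omega, ?_⟩
        rw [PySem.List.length_pyRange_one]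
        have h1 := hble l hl'
        have h2 := hpos l hl'
        omega)]
      rw [show PySem.List.pyRange (N - lm + 1) (N+1) 1
            = PySem.List.pyRange (N - lm + 1) ((N - lm + 1) + lm) 1 from by
        rw [show (N - lm + 1) + lm = N + 1 from by ring]]
      rw [main_fill (lm :: g') lm g' (N - lm + 1) rfl hsort hpos]
      rw [hlens, hG]
      unfold win
      simp [List.append_assoc]
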